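-- pv_equiv track=rewrite | github.com/romanchechyotkin/ai | machine_learning/main.py | count_total_words
-- ===== SOURCE A (Python) =====
-- def count_total_words(sentence_list):
--     all_words = sum(len(sentence) for sentence in sentence_list)
--
--     all_symbols = 0
--     for sentence in sentence_list:
--         for word in sentence:
--             if word in "?<>/|!@#$%^*()_{}[]":
--                 all_symbols += 1
--
--     return all_words - all_symbols
-- ===== SOURCE B (Python) =====
-- def count_total_words(sentence_list):
--     symbols = "?<>/|!@#$%^*()_{}[]"
--     per_sentence = [len([w for w in sentence if w not in symbols])
--                     for sentence in sentence_list]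
--     return sum(per_sentence)
-- ===== Notes on version B (the rewrite author's own statement) =====
-- stated objective: simpler
-- what changed: Replaces the two-phase total-then-subtract-symbols loops by a map/filter/sum decomposition: each sentence is filtered to its surviving words, the filtered lengths are collected per sentence and summed.
import Mathlib
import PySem

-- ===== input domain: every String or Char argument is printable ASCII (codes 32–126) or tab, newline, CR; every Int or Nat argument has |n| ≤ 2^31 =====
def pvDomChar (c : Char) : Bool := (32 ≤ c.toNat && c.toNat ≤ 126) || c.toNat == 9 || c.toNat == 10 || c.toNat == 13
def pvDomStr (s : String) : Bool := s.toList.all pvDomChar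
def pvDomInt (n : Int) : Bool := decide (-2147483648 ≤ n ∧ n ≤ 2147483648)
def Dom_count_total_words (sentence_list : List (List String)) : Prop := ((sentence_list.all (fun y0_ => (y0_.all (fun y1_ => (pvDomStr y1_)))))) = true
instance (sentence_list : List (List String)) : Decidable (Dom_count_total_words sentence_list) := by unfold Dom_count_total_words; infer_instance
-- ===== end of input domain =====

-- B replaces A's total-then-subtract loops by a map/filter/sum decomposition
-- (objective: simpler).

-- ===== PORT A =====
def count_total_words (sentence_list : List (List String)) : Int :=
  let all_words : Int := sentence_list.foldl (fun acc sentence => acc + (sentence.length : Int)) 0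
  let all_symbols : Int := sentence_list.foldl (fun acc sentence =>
    sentence.foldl (fun a word =>
      if PySem.Str.isIn word "?<>/|!@#$%^*()_{}[]" then a + 1 else a) acc) 0
  all_words - all_symbols

-- ===== PORT B =====
def count_total_words_alt (sentence_list : List (List String)) : Int :=
  let per_sentence : List Int :=
    sentence_list.map (fun sentence =>
      ((sentence.filter (fun w => !PySem.Str.isIn w "?<>/|!@#$%^*()_{}[]")).length : Int))
  per_sentence.sum

-- ===== PRECONDITION & SPEC =====
def Spec_count_total_words (sentence_list : List (List String)) (out : Int) : Prop := out = count_total_words_alt sentence_list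
instance (sentence_list : List (List String)) (out : Int) : Decidable (Spec_count_total_words sentence_list out) := by unfold Spec_count_total_words; infer_instance

-- ===== CLAIM (what is proved, stated in full; the proofs are below) =====
def Claim_equal_count_total_words : Prop := ∀ (sentence_list : List (List String)), Dom_count_total_words sentence_list → Spec_count_total_words sentence_list (count_total_words sentence_list)

-- ===== LEMMAS AND PROOFS =====
theorem pv_symfold (ws : List String) (y : Int) :
    ws.foldl (fun a word =>
      if PySem.Str.isIn word "?<>/|!@#$%^*()_{}[]" then a + 1 else a) y
      = y + ((ws.filter (fun w => PySem.Str.isIn w "?<>/|!@#$%^*()_{}[]")).length : Int) := by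
  induction ws generalizing y with
  | nil => simp
  | cons w t ih =>
    simp only [List.foldl_cons, List.filter_cons]
    by_cases h : PySem.Str.isIn w "?<>/|!@#$%^*()_{}[]" = true
    · rw [if_pos h, ih, if_pos h]
      simp only [List.length_cons]
      push_cast; ring
    · rw [if_neg h, ih, if_neg h]

theorem pv_sentence (s : List String) :
    (s.length : Int)
      - ((s.filter (fun w => PySem.Str.isIn w "?<>/|!@#$%^*()_{}[]")).length : Int)
      = ((s.filter (fun w => !PySem.Str.isIn w "?<>/|!@#$%^*()_{}[]")).length : Int) := by
  induction s with
  | nil => simp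
  | cons w t ih =>
    rw [List.filter_cons, List.filter_cons]
    by_cases h : PySem.Str.isIn w "?<>/|!@#$%^*()_{}[]" = true
    · rw [if_pos h, if_neg (by rw [h]; exact Bool.false_ne_true)]
      simp only [List.length_cons]
      push_cast; linarith
    · rw [if_neg h, if_pos (by rw [Bool.eq_false_iff.mpr h]; rfl)]
      simp only [List.length_cons]
      push_cast; linarith

theorem pv_main (L : List (List String)) (x y : Int) :
    L.foldl (fun acc sentence => acc + (sentence.length : Int)) x
      - L.foldl (fun acc sentence =>
          sentence.foldl (fun a word =>
            if PySem.Str.isIn word "?<>/|!@#$%^*()_{}[]" then a + 1 else a) acc) y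
      = (x - y) + (L.map (fun sentence =>
          ((sentence.filter (fun w => !PySem.Str.isIn w "?<>/|!@#$%^*()_{}[]")).length : Int))).sum := by
  induction L generalizing x y with
  | nil => simp
  | cons s t ih =>
    simp only [List.foldl_cons, List.map_cons, List.sum_cons]
    rw [pv_symfold s y, ih]
    have := pv_sentence s
    linarith

-- ===== VERDICT (by name: the statement is the Claim_ definition above) =====
theorem count_total_words_spec : Claim_equal_count_total_words := by
  intro L _
  unfold Spec_count_total_words count_total_words count_total_words_alt
  simpa using pv_main L 0 0
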